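-- pv_equiv track=rewrite | github.com/DigiMediaCompany/VideoTextExtract | translate2.py | chunk_entries
-- ===== SOURCE A (Python) =====
-- def chunk_entries(entries, min_lines=20):
--     """Groups entries into chunks of >=20 lines, ending at a '.' if possible."""
--     chunks, current, current_idx = [], [], []
--     for idx, (num, time_range, text) in enumerate(entries):
--         current.append(text)
--         current_idx.append((num, time_range))
--         # if we've got enough lines and the text ends with ".", close the chunk
--         if len(current) >= min_lines and text.endswith("."):
--             chunks.append((" ".join(current), current_idx))
--             current, current_idx = [], []
--     if current:  # leftover
--         chunks.append((" ".join(current), current_idx))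
--     return chunks
-- ===== SOURCE B (Python) =====
-- def _cut(entries, min_lines):
--     """Length of the first chunk of entries: first position i+1 >= min_lines
--     whose text ends with '.', else all of entries."""
--     for i, (_, _, text) in enumerate(entries):
--         if i + 1 >= min_lines and text.endswith("."):
--             return i + 1
--     return len(entries)
--
--
-- def chunk_entries(entries, min_lines=20):
--     """Groups entries into chunks of >=20 lines, ending at a '.' if possible."""
--     chunks = []
--     rest = entries
--     while rest:
--         k = _cut(rest, min_lines)
--         head, rest = rest[:k], rest[k:]
--         chunks.append((" ".join(t for _, _, t in head),
--                        [(n, tr) for n, tr, _ in head]))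
--     return chunks
-- ===== Notes on version B (the rewrite author's own statement) =====
-- stated objective: alternative
-- what changed: Replaces A's single fold that mutates a pending-chunk accumulator with a chunk-at-a-time decomposition: a helper computes the length of the next chunk (first position >= min_lines whose text ends with '.') and the list is repeatedly split off at that boundary.
import Mathlib
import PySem

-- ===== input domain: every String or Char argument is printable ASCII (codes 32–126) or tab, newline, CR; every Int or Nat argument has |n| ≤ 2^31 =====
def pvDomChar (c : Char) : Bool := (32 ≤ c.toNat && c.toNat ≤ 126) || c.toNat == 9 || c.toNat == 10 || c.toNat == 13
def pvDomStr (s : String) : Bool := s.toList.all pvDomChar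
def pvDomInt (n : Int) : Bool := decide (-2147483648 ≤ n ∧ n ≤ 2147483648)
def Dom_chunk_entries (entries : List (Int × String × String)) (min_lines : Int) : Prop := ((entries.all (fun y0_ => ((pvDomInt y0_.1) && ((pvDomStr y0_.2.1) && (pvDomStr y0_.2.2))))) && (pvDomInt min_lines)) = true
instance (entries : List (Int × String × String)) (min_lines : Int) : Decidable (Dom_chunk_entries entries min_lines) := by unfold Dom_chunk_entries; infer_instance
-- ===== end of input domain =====

-- B replaces A's single fold over a mutable pending-chunk accumulator by a chunk-at-a-time
-- decomposition (compute the next chunk's length, split it off, repeat); same cost, alternative structure.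

-- ===== PORT A =====
-- the loop body of A's for-loop, acting on the state (chunks, current, current_idx)
def stepA (min_lines : Int)
    (s : List (String × (List (Int × String))) × List String × List (Int × String))
    (e : Int × String × String) :
    List (String × (List (Int × String))) × List String × List (Int × String) :=
  let current := s.2.1 ++ [e.2.2]
  let current_idx := s.2.2 ++ [(e.1, e.2.1)]
  if ((current.length : Int) ≥ min_lines ∧ PySem.Str.endswith e.2.2 "." = true) then
    (s.1 ++ [(PySem.Str.join " " current, current_idx)], [], [])
  else
    (s.1, current, current_idx)

def chunk_entries (entries : List (Int × String × String)) (min_lines : Int) : List (String × (List (Int × String))) :=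
  let st := entries.foldl (stepA min_lines) ([], [], [])
  if st.2.1 ≠ [] then st.1 ++ [(PySem.Str.join " " st.2.1, st.2.2)] else st.1

-- ===== PORT B =====
-- _cut: first position i+1 >= min_lines whose text ends with '.', else the whole list; i is the enumerate counter
def pvCutAux : List (Int × String × String) → Int → Nat → Nat
  | [], _, i => i
  | e :: rest, m, i =>
    if ((i : Int) + 1 ≥ m ∧ PySem.Str.endswith e.2.2 "." = true) then i + 1
    else pvCutAux rest m (i + 1)

theorem pvCutAux_ge : ∀ (l : List (Int × String × String)) (m : Int) (i : Nat), i ≤ pvCutAux l m i := by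
  intro l
  induction l with
  | nil => intro m i; simp [pvCutAux]
  | cons e rest ih =>
    intro m i
    simp only [pvCutAux]
    split
    · omega
    · exact Nat.le_trans (Nat.le_succ i) (ih m (i + 1))

theorem pvCutAux_pos (l : List (Int × String × String)) (m : Int) (h : l ≠ []) :
    1 ≤ pvCutAux l m 0 := by
  cases l with
  | nil => exact absurd rfl h
  | cons e rest =>
    simp only [pvCutAux]
    split
    · omega
    · exact pvCutAux_ge rest m 1

-- the while-loop of B, with the accumulated chunks
def altGo (rest : List (Int × String × String)) (m : Int)
    (chunks : List (String × (List (Int × String)))) : List (String × (List (Int × String))) :=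
  if h : rest = [] then chunks
  else
    let k := pvCutAux rest m 0
    altGo (rest.drop k) m
      (chunks ++ [(PySem.Str.join " " ((rest.take k).map (fun e => e.2.2)),
                   (rest.take k).map (fun e => (e.1, e.2.1)))])
termination_by rest.length
decreasing_by
  have h1 : 1 ≤ pvCutAux rest m 0 := pvCutAux_pos rest m h
  have h2 : 0 < rest.length := List.length_pos_iff.mpr h
  simp only [List.length_drop]
  omega

def chunk_entries_alt (entries : List (Int × String × String)) (min_lines : Int) : List (String × (List (Int × String))) :=
  altGo entries min_lines []

-- ===== PRECONDITION & SPEC =====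
def Spec_chunk_entries (entries : List (Int × String × String)) (min_lines : Int) (out : List (String × (List (Int × String)))) : Prop := out = chunk_entries_alt entries min_lines
instance (entries : List (Int × String × String)) (min_lines : Int) (out : List (String × (List (Int × String)))) : Decidable (Spec_chunk_entries entries min_lines out) := by unfold Spec_chunk_entries; infer_instance

-- ===== CLAIM (what is proved, stated in full; the proofs are below) =====
def Claim_equal_chunk_entries : Prop := ∀ (entries : List (Int × String × String)) (min_lines : Int), Dom_chunk_entries entries min_lines → Spec_chunk_entries entries min_lines (chunk_entries entries min_lines)

-- ===== LEMMAS AND PROOFS =====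

-- the chunk produced from a pending list of entries P
def mkChunk (P : List (Int × String × String)) : String × (List (Int × String)) :=
  (PySem.Str.join " " (P.map (fun e => e.2.2)), P.map (fun e => (e.1, e.2.1)))

-- reference recursion: process l with pending entries P
def runA : List (Int × String × String) → Int → List (Int × String × String) → List (String × (List (Int × String)))
  | [], _, P => if P ≠ [] then [mkChunk P] else []
  | e :: rest, m, P =>
    if (((P ++ [e]).length : Int) ≥ m ∧ PySem.Str.endswith e.2.2 "." = true) then
      mkChunk (P ++ [e]) :: runA rest m []
    else
      runA rest m (P ++ [e])

def finishA (st : List (String × (List (Int × String))) × List String × List (Int × String)) :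
    List (String × (List (Int × String))) :=
  if st.2.1 ≠ [] then st.1 ++ [(PySem.Str.join " " st.2.1, st.2.2)] else st.1

theorem foldA_runA : ∀ (l : List (Int × String × String)) (m : Int)
    (chunks : List (String × (List (Int × String)))) (P : List (Int × String × String)),
    finishA (l.foldl (stepA m) (chunks, P.map (fun e => e.2.2), P.map (fun e => (e.1, e.2.1))))
      = chunks ++ runA l m P := by
  intro l
  induction l with
  | nil =>
    intro m chunks P
    cases P with
    | nil => simp [finishA, runA]
    | cons p ps => simp [finishA, runA, mkChunk]
  | cons e rest ih =>
    intro m chunks P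
    simp only [List.foldl_cons, stepA, runA]
    have hcur : P.map (fun e => e.2.2) ++ [e.2.2] = (P ++ [e]).map (fun e => e.2.2) := by simp
    have hidx : P.map (fun e => (e.1, e.2.1)) ++ [(e.1, e.2.1)] = (P ++ [e]).map (fun e => (e.1, e.2.1)) := by simp
    simp only [hcur, hidx, List.length_map]
    split
    · have := ih m (chunks ++ [(PySem.Str.join " " ((P ++ [e]).map (fun e => e.2.2)),
        (P ++ [e]).map (fun e => (e.1, e.2.1)))]) []
      simp only [List.map_nil] at this
      rw [this]
      simp [mkChunk]
    · exact ih m chunks (P ++ [e])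

theorem runA_cut : ∀ (l : List (Int × String × String)) (m : Int) (P : List (Int × String × String)),
    l ≠ [] →
    runA l m P = mkChunk (P ++ l.take (pvCutAux l m P.length - P.length))
      :: runA (l.drop (pvCutAux l m P.length - P.length)) m [] := by
  intro l
  induction l with
  | nil => intro m P h; exact absurd rfl h
  | cons e rest ih =>
    intro m P _
    simp only [runA, pvCutAux]
    have hc : (((P ++ [e]).length : Int) ≥ m) ↔ ((P.length : Int) + 1 ≥ m) := by
      simp only [List.length_append, List.length_cons, List.length_nil, Nat.cast_add, Nat.cast_one]
      omega
    by_cases hcond : (((P.length : Nat) : Int) + 1 ≥ m ∧ PySem.Str.endswith e.2.2 "." = true)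
    · rw [if_pos hcond, if_pos (by rw [hc]; exact hcond)]
      simp
    · rw [if_neg hcond, if_neg (by rw [hc]; exact hcond)]
      cases hrest : rest with
      | nil =>
        simp only [pvCutAux]
        have : P.length + 1 - P.length = 1 := by omega
        simp [runA, this, mkChunk]
      | cons r rs =>
        rw [← hrest]
        have hr : rest ≠ [] := by rw [hrest]; simp
        rw [ih m (P ++ [e]) hr]
        have hge : P.length + 1 ≤ pvCutAux rest m (P.length + 1) := pvCutAux_ge rest m (P.length + 1)
        have hlen : (P ++ [e]).length = P.length + 1 := by simp
        rw [hlen]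
        set k := pvCutAux rest m (P.length + 1) with hk
        have h1 : k - P.length = (k - (P.length + 1)) + 1 := by omega
        rw [h1]
        simp only [List.take_succ_cons, List.drop_succ_cons]
        simp [List.append_assoc]

theorem altGo_runA : ∀ (n : Nat) (l : List (Int × String × String)) (m : Int)
    (chunks : List (String × (List (Int × String)))), l.length ≤ n →
    altGo l m chunks = chunks ++ runA l m [] := by
  intro n
  induction n with
  | zero =>
    intro l m chunks hn
    have : l = [] := List.eq_nil_of_length_eq_zero (by omega)
    subst this
    rw [altGo]
    simp [runA]
  | succ n ih =>
    intro l m chunks hn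
    by_cases h : l = []
    · subst h; rw [altGo]; simp [runA]
    · rw [altGo, dif_neg h]
      have hk1 : 1 ≤ pvCutAux l m 0 := pvCutAux_pos l m h
      have hlen : (l.drop (pvCutAux l m 0)).length ≤ n := by
        have : 0 < l.length := List.length_pos_iff.mpr h
        simp only [List.length_drop]; omega
      rw [ih (l.drop (pvCutAux l m 0)) m _ hlen]
      rw [runA_cut l m [] h]
      simp only [List.length_nil, Nat.sub_zero, List.nil_append]
      simp [mkChunk, List.append_assoc]

-- ===== VERDICT (by name: the statement is the Claim_ definition above) =====
theorem chunk_entries_spec : Claim_equal_chunk_entries := by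
  intro entries min_lines _
  unfold Spec_chunk_entries chunk_entries chunk_entries_alt
  have hA : finishA (entries.foldl (stepA min_lines) ([], [], []))
      = [] ++ runA entries min_lines [] := by
    have := foldA_runA entries min_lines [] []
    simpa using this
  have hB := altGo_runA entries.length entries min_lines [] (le_refl _)
  simp only [List.nil_append] at hA hB
  rw [hB, ← hA]
  rfl
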